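-- pv_equiv track=rewrite | github.com/kapow-dc-uba-ar/poisson | poisson/analysis/prefix.py | prefix_distribution_from_list
-- ===== SOURCE A (Python) =====
-- def prefix_distribution_from_list(words_list, prefix_length):
--     prefix_occurrences = dict()
--     for word in words_list:
--         if len(word) >= prefix_length:
--             prefix = word[:prefix_length]
--             if prefix in prefix_occurrences:
--                 prefix_occurrences[prefix] += 1
--             else:
--                 prefix_occurrences[prefix] = 1
--     return prefix_occurrences
-- ===== SOURCE B (Python) =====
-- def prefix_distribution_from_list(words_list, prefix_length):
--     prefixes = [w[:prefix_length] for w in words_list if len(w) >= prefix_length]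
--     s = sorted(prefixes)
--     runs = {}
--     i = 0
--     while i < len(s):
--         j = i
--         while j < len(s) and s[j] == s[i]:
--             j += 1
--         runs[s[i]] = j - i
--         i = j
--     return {p: runs[p] for p in dict.fromkeys(prefixes)}
-- ===== Notes on version B (the rewrite author's own statement) =====
-- stated objective: alternative
-- what changed: Replaces A's incremental hash counting with sorting the qualifying prefixes and counting equal adjacent runs in one scan, then re-emitting the counts in first-occurrence order.
import Mathlib
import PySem

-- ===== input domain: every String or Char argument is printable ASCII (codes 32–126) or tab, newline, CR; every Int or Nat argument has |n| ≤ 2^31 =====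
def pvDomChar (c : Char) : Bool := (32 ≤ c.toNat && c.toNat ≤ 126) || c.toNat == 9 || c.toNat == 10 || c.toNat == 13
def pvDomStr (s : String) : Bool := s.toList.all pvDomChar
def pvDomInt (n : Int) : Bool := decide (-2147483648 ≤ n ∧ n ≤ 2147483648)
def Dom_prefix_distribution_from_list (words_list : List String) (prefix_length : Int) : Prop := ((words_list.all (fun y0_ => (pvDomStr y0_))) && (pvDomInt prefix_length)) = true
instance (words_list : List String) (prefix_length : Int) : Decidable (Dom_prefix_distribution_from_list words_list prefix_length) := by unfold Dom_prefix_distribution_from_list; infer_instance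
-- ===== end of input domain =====

-- B replaces A's incremental dict counting by sorting the qualifying prefixes, counting equal adjacent runs
-- in a single scan, and re-emitting counts in first-occurrence order (objective: alternative algorithm).

-- ===== PORT A =====
-- literal transliteration of A: fold the words, incrementing a dict entry if present, else inserting 1
def prefix_distribution_from_list (words_list : List String) (prefix_length : Int) : List (String × Int) :=
  (words_list.foldl
    (fun (d : PySem.Dict String Int) (word : String) =>
      if prefix_length ≤ PySem.Str.len word then
        let pfx := PySem.Str.slice word none (some prefix_length)
        if d.contains pfx then d.insert pfx (d.getD pfx 0 + 1)
        else d.insert pfx 1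
      else d)
    PySem.Dict.empty).items

-- ===== PORT B =====
-- B's while/while run scan over the sorted list: each step emits (s[i], j - i) for the maximal
-- run of elements equal to s[i] and continues at j (= takeWhile/dropWhile on the remaining suffix)
def pvRunScan : List String → List (String × Int)
  | [] => []
  | x :: xs =>
      (x, 1 + ((xs.takeWhile (fun y => y == x)).length : Int)) ::
        pvRunScan (xs.dropWhile (fun y => y == x))
termination_by l => l.length
decreasing_by
  exact Nat.lt_succ_of_le (xs.length_dropWhile_le _)

-- literal transliteration of B: prefixes list, sort, run-length scan into `runs`,
-- then {p: runs[p] for p in dict.fromkeys(prefixes)}  (runs[p] always hits: p occurs in the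
-- sorted list, so getD with default 0 is exact — no KeyError path is reachable)
def prefix_distribution_from_list_alt (words_list : List String) (prefix_length : Int) : List (String × Int) :=
  let prefixes :=
    (words_list.filter (fun word => decide (prefix_length ≤ PySem.Str.len word))).map
      (fun word => PySem.Str.slice word none (some prefix_length))
  let s := PySem.List.sorted prefixes (fun x => x) false
  let runs : PySem.Dict String Int :=
    (pvRunScan s).foldl (fun d pr => d.insert pr.1 pr.2) PySem.Dict.empty
  (PySem.List.dedup prefixes).map (fun p => (p, runs.getD p 0))

-- ===== PRECONDITION & SPEC =====
def Spec_prefix_distribution_from_list (words_list : List String) (prefix_length : Int) (out : List (String × Int)) : Prop := out = prefix_distribution_from_list_alt words_list prefix_length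
instance (words_list : List String) (prefix_length : Int) (out : List (String × Int)) : Decidable (Spec_prefix_distribution_from_list words_list prefix_length out) := by unfold Spec_prefix_distribution_from_list; infer_instance

-- ===== CLAIM (what is proved, stated in full; the proofs are below) =====
def Claim_equal_prefix_distribution_from_list : Prop := ∀ (words_list : List String) (prefix_length : Int), Dom_prefix_distribution_from_list words_list prefix_length → Spec_prefix_distribution_from_list words_list prefix_length (prefix_distribution_from_list words_list prefix_length)

-- ===== LEMMAS AND PROOFS =====

-- A's guarded fold over the words is the counter step folded over the filtered-and-sliced prefix list.
theorem pv_foldl_filter_map {α β σ : Type} (p : α → Bool) (g : α → β) (f : σ → β → σ) :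
    ∀ (l : List α) (d : σ),
      l.foldl (fun d w => if p w then f d (g w) else d) d
        = ((l.filter p).map g).foldl f d := by
  intro l
  induction l with
  | nil => intro d; rfl
  | cons x xs ih =>
    intro d
    by_cases h : p x <;> simp [h, ih]

-- A's branch on `contains` is the single `getD + 1` counter step.
theorem pv_stepA_eq_counter_step (d : PySem.Dict String Int) (pfx : String) :
    (if d.contains pfx then d.insert pfx (d.getD pfx 0 + 1) else d.insert pfx 1)
      = d.insert pfx (d.getD pfx 0 + 1) := by
  by_cases h : d.contains pfx = true
  · simp [h]
  · rw [if_neg h, PySem.Dict.getD_of_not_contains d (0:Int) (by simpa using h)]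
    norm_num

-- every key emitted by the run scan occurs in its input
theorem pv_mem_of_mem_runScan (p : String) (c : Int) :
    ∀ (L : List String), (p, c) ∈ pvRunScan L → p ∈ L := by
  intro L
  induction L using pvRunScan.induct with
  | case1 => intro h; simp [pvRunScan] at h
  | case2 x xs ih =>
    intro h
    rw [pvRunScan] at h
    rcases List.mem_cons.mp h with h1 | h2
    · simp_all
    · exact List.mem_cons_of_mem x ((xs.dropWhile_sublist _).mem (ih h2))

-- on a sorted list, the value equal to the head does not survive dropWhile (== head)
theorem pv_head_not_mem_drop (x : String) : ∀ (xs : List String),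
    (x :: xs).Pairwise (· ≤ ·) → x ∉ xs.dropWhile (fun y => y == x) := by
  intro xs
  induction xs with
  | nil => simp
  | cons y ys ih =>
    intro hs
    by_cases hxy : (y == x) = true
    · simp only [List.dropWhile_cons, hxy, if_pos]
      exact ih (by
        rcases List.pairwise_cons.mp hs with ⟨h1, h2⟩
        rcases List.pairwise_cons.mp h2 with ⟨_, h4⟩
        exact List.pairwise_cons.mpr ⟨fun z hz => h1 z (List.mem_cons_of_mem y hz), h4⟩)
    · simp only [List.dropWhile_cons, hxy, if_neg, Bool.false_eq_true, not_false_iff]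
      intro hmem
      have hne : y ≠ x := fun h => hxy (by simp [h])
      rcases List.mem_cons.mp hmem with h1 | h2
      · exact hne h1.symm
      · rcases List.pairwise_cons.mp hs with ⟨ha, hb⟩
        rcases List.pairwise_cons.mp hb with ⟨hc, _⟩
        exact hne (le_antisymm (hc x h2) (ha y List.mem_cons_self))

-- sortedness survives dropping the head's run
theorem pv_pairwise_drop (x : String) (xs : List String)
    (hs : (x :: xs).Pairwise (· ≤ ·)) :
    (xs.dropWhile (fun y => y == x)).Pairwise (· ≤ ·) :=
  (List.Pairwise.sublist (xs.dropWhile_sublist _) (List.Pairwise.of_cons hs))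

-- each element of a sorted list appears in the run scan paired with its multiplicity
theorem pv_count_mem_runScan :
    ∀ (L : List String), L.Pairwise (· ≤ ·) → ∀ p, p ∈ L → (p, (L.count p : Int)) ∈ pvRunScan L := by
  intro L
  induction L using pvRunScan.induct with
  | case1 => intro _ p hp; simp at hp
  | case2 x xs ih =>
    intro hs p hp
    have hsplit := List.takeWhile_append_dropWhile (p := fun y => y == x) (l := xs)
    have hrunx : ∀ z ∈ xs.takeWhile (fun y => y == x), z = x := by
      intro z hz; simpa using List.mem_takeWhile_imp hz
    rw [pvRunScan]
    by_cases hpx : p = x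
    · subst hpx
      have hnot : p ∉ xs.dropWhile (fun y => y == p) := pv_head_not_mem_drop p xs hs
      have hxc : xs.count p = (xs.takeWhile (fun y => y == p)).length := by
        conv_lhs => rw [← hsplit]
        rw [List.count_append, List.count_eq_zero.mpr hnot,
            List.count_eq_length.mpr (fun b hb => by simp [hrunx b hb])]
        omega
      have hcast : (((p :: xs).count p : Nat) : Int)
          = 1 + ((xs.takeWhile (fun y => y == p)).length : Int) := by
        rw [List.count_cons_self, hxc]; push_cast; ring
      exact List.mem_cons.mpr (Or.inl (by rw [hcast]))
    · have hpxs : p ∈ xs := by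
        rcases List.mem_cons.mp hp with h | h
        · exact absurd h hpx
        · exact h
      have hprest : p ∈ xs.dropWhile (fun y => y == x) := by
        rcases List.mem_append.mp (by rw [hsplit]; exact hpxs) with h | h
        · exact absurd (hrunx p h) hpx
        · exact h
      have hxp : ¬ (x = p) := fun h => hpx h.symm
      have h0 : (xs.takeWhile (fun y => y == x)).count p = 0 :=
        List.count_eq_zero.mpr (fun hmem => hpx (hrunx p hmem))
      have hcnt : (x :: xs).count p = (xs.dropWhile (fun y => y == x)).count p := by
        conv_lhs => rw [← hsplit]
        rw [List.count_cons, List.count_append, h0]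
        have : (x == p) = false := by simp [hxp]
        rw [this]
        simp
      exact List.mem_cons.mpr (Or.inr (by
        rw [hcnt]; exact ih (pv_pairwise_drop x xs hs) p hprest))

-- the first components of the run scan of a sorted list are distinct
theorem pv_nodup_fst_runScan :
    ∀ (L : List String), L.Pairwise (· ≤ ·) → ((pvRunScan L).map Prod.fst).Nodup := by
  intro L
  induction L using pvRunScan.induct with
  | case1 => simp [pvRunScan]
  | case2 x xs ih =>
    intro hs
    rw [pvRunScan]
    simp only [List.map_cons, List.nodup_cons]
    refine ⟨?_, ih (pv_pairwise_drop x xs hs)⟩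
    intro hmem
    rcases List.mem_map.mp hmem with ⟨⟨p, c⟩, hpc, hfst⟩
    exact pv_head_not_mem_drop x xs hs
      (pv_mem_of_mem_runScan x c _ (by simpa using hfst ▸ hpc))

-- B's `runs` dict looks up exactly the multiplicity of p in the prefix list
theorem pv_getD_runs (prefixes : List String) (p : String) (hp : p ∈ prefixes) :
    ((pvRunScan (PySem.List.sorted prefixes (fun x => x) false)).foldl
        (fun d pr => d.insert pr.1 pr.2) PySem.Dict.empty).getD p 0
      = (prefixes.count p : Int) := by
  set s := PySem.List.sorted prefixes (fun x => x) false with hsdef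
  have hsorted : s.Pairwise (· ≤ ·) := by
    have := PySem.List.sorted_pairwise prefixes (fun x => x)
    simpa using this
  have hnodup := pv_nodup_fst_runScan s hsorted
  have hitems :
      ((pvRunScan s).foldl (fun d pr => d.insert pr.1 pr.2) PySem.Dict.empty).items
        = pvRunScan s := by
    have := PySem.Dict.items_foldl_insert_fresh (l := pvRunScan s)
      (k := Prod.fst) (v := Prod.snd) (d := (PySem.Dict.empty : PySem.Dict String Int))
      (by intro a _; simp [PySem.Dict.contains_empty]) hnodup
    simpa using this
  have hps : p ∈ s := by
    rw [hsdef]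
    exact (PySem.List.mem_sorted prefixes (fun x => x) false p).mpr hp
  have hcount : s.count p = prefixes.count p :=
    (PySem.List.sorted_perm prefixes (fun x => x) false).count_eq p
  have hmem : (p, (s.count p : Int)) ∈
      ((pvRunScan s).foldl (fun d pr => d.insert pr.1 pr.2) PySem.Dict.empty).items := by
    rw [hitems]; exact pv_count_mem_runScan s hsorted p hps
  have hkeys : ((pvRunScan s).foldl (fun d pr => d.insert pr.1 pr.2)
      (PySem.Dict.empty : PySem.Dict String Int)).keys.Nodup := by
    simpa [PySem.Dict.keys, hitems] using hnodup
  rw [PySem.Dict.getD_of_mem_items _ hmem hkeys, hcount]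

-- ===== VERDICT (by name: the statement is the Claim_ definition above) =====
theorem prefix_distribution_from_list_spec : Claim_equal_prefix_distribution_from_list := by
  intro words_list prefix_length _
  unfold Spec_prefix_distribution_from_list prefix_distribution_from_list prefix_distribution_from_list_alt
  have hstep :
      (fun (d : PySem.Dict String Int) (word : String) =>
        if prefix_length ≤ PySem.Str.len word then
          let pfx := PySem.Str.slice word none (some prefix_length)
          if d.contains pfx then d.insert pfx (d.getD pfx 0 + 1)
          else d.insert pfx 1
        else d)
      = (fun (d : PySem.Dict String Int) (word : String) =>
          if decide (prefix_length ≤ PySem.Str.len word) = true then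
            d.insert (PySem.Str.slice word none (some prefix_length))
              (d.getD (PySem.Str.slice word none (some prefix_length)) 0 + 1)
          else d) := by
    funext d word
    by_cases h : prefix_length ≤ PySem.Str.len word
    · rw [if_pos h,
          if_pos (show (decide (prefix_length ≤ PySem.Str.len word)) = true by simp only [decide_eq_true_eq]; exact h)]
      exact pv_stepA_eq_counter_step d (PySem.Str.slice word none (some prefix_length))
    · rw [if_neg h,
          if_neg (show ¬ (decide (prefix_length ≤ PySem.Str.len word)) = true by simp only [decide_eq_true_eq]; exact h)]
  rw [hstep,
      pv_foldl_filter_map (fun word => decide (prefix_length ≤ PySem.Str.len word))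
        (fun word => PySem.Str.slice word none (some prefix_length))
        (fun (d : PySem.Dict String Int) pfx => d.insert pfx (d.getD pfx 0 + 1)),
      PySem.Dict.foldl_insert_getD_add_one_eq_counter,
      PySem.Dict.items_counter]
  simp only [PySem.List.dedup_eq_ofList]
  apply List.map_congr_left
  intro p hp
  have hp' : p ∈ (words_list.filter
      (fun word => decide (prefix_length ≤ PySem.Str.len word))).map
      (fun word => PySem.Str.slice word none (some prefix_length)) :=
    (PySem.Set.mem_ofList _ _).mp hp
  rw [pv_getD_runs _ p hp']
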